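-- pv_equiv track=rewrite | github.com/marta-seq/enzymeClassification | get_prot_representation.py | deal_with_strange_aa
-- ===== SOURCE A (Python) =====
-- def deal_with_strange_aa(sequences, alphabet):
--     new_sequences=[]
--     for seq in sequences:
--         if len(alphabet) < 25:  # alphabet x or alphabet normal
--             seq1 = seq.replace('B', 'N')  # asparagine N / aspartic acid  D - asx - B
--             seq2 = seq1.replace('Z', 'Q')  # glutamine Q / glutamic acid  E - glx - Z
--             seq3 = seq2.replace('U',
--                                 'C')  # selenocisteina, the closest is the cisteine. but it is a different aminoacid . take care.
--             seq4 = seq3.replace('O', 'K')  # Pyrrolysine to lysine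
--             seq = seq4
--             if len(alphabet) == 20:  # alphabet normal substitute every letters
--                 seq = seq4.replace('X', '')  # unknown character eliminated
--         new_sequences.append(seq)
--     return new_sequences
-- ===== SOURCE B (Python) =====
-- def deal_with_strange_aa(sequences, alphabet):
--     if len(alphabet) >= 25:
--         return list(sequences)
--     table = {ord('B'): 'N', ord('Z'): 'Q', ord('U'): 'C', ord('O'): 'K'}
--     if len(alphabet) == 20:
--         table[ord('X')] = None
--     return [seq.translate(table) for seq in sequences]
-- ===== Notes on version B (the rewrite author's own statement) =====
-- stated objective: idiomatic
-- what changed: One translation table built once and a single str.translate pass per sequence (with X deleted via None in the 20-letter branch) replaces the chain of four or five full-string .replace scans.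
import Mathlib
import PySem

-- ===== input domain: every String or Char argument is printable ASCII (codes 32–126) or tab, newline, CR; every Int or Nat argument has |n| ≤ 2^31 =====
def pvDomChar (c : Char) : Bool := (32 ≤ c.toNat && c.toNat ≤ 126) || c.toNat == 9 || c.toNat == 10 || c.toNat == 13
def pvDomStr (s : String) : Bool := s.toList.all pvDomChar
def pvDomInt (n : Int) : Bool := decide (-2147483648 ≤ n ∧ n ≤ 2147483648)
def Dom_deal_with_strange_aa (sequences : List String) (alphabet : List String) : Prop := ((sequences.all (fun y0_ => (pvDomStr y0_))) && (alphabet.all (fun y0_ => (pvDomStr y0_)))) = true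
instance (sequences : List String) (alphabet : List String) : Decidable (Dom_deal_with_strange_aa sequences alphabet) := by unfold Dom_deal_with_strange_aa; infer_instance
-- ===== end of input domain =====

-- B builds one translation table and does a single character pass per sequence
-- instead of A's chain of four or five full-string .replace scans (idiomatic; same return value).

-- ===== PORT A =====
def deal_with_strange_aa (sequences : List String) (alphabet : List String) : List String :=
  sequences.foldl (fun new_sequences seq =>
    let seq' :=
      if alphabet.length < 25 then
        let seq1 := PySem.Str.replace seq "B" "N"
        let seq2 := PySem.Str.replace seq1 "Z" "Q"
        let seq3 := PySem.Str.replace seq2 "U" "C"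
        let seq4 := PySem.Str.replace seq3 "O" "K"
        if alphabet.length = 20 then PySem.Str.replace seq4 "X" "" else seq4
      else seq
    new_sequences ++ [seq']) []

-- ===== PORT B =====
-- translation table lookup: B→N, Z→Q, U→C, O→K, others unchanged
def pvTr (c : Char) : Char :=
  if c = 'B' then 'N' else if c = 'Z' then 'Q' else if c = 'U' then 'C'
  else if c = 'O' then 'K' else c

-- table with X→None: X deleted, others translated (one pass, as str.translate)
def pvTrX (c : Char) : List Char :=
  if c = 'X' then [] else [pvTr c]

def deal_with_strange_aa_alt (sequences : List String) (alphabet : List String) : List String :=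
  if 25 ≤ alphabet.length then sequences
  else if alphabet.length = 20 then
    sequences.map (fun seq => String.ofList (seq.toList.flatMap pvTrX))
  else
    sequences.map (fun seq => String.ofList (seq.toList.map pvTr))

-- ===== PRECONDITION & SPEC =====
def Spec_deal_with_strange_aa (sequences : List String) (alphabet : List String) (out : List String) : Prop := out = deal_with_strange_aa_alt sequences alphabet
instance (sequences : List String) (alphabet : List String) (out : List String) : Decidable (Spec_deal_with_strange_aa sequences alphabet out) := by unfold Spec_deal_with_strange_aa; infer_instance

-- ===== CLAIM (what is proved, stated in full; the proofs are below) =====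
def Claim_equal_deal_with_strange_aa : Prop := ∀ (sequences : List String) (alphabet : List String), Dom_deal_with_strange_aa sequences alphabet → Spec_deal_with_strange_aa sequences alphabet (deal_with_strange_aa sequences alphabet)

-- ===== LEMMAS AND PROOFS =====

-- single-character replace is a flatMap over the characters
theorem replace_go_single (o : Char) (new : List Char) :
    ∀ (fuel : Nat) (l acc : List Char), l.length ≤ fuel →
      PySem.Chars.replace.go [o] new fuel l acc
        = acc.reverse ++ l.flatMap (fun c => if c = o then new else [c]) := by
  intro fuel
  induction fuel with
  | zero =>
    intro l acc h
    have : l = [] := List.eq_nil_of_length_eq_zero (Nat.le_zero.mp h)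
    subst this
    simp [PySem.Chars.replace.go]
  | succ n ih =>
    intro l acc h
    cases l with
    | nil => simp [PySem.Chars.replace.go]
    | cons c t =>
      rw [PySem.Chars.replace.go]
      by_cases hc : c = o
      · subst hc
        have hp : List.isPrefixOf [c] (c :: t) = true := by
          simp [List.isPrefixOf]
        simp only [hp, List.length, List.drop, if_true]
        rw [ih t (new.reverse ++ acc) (by simpa using Nat.le_of_succ_le_succ h)]
        simp
      · have hp : List.isPrefixOf [o] (c :: t) = false := by
          simp [List.isPrefixOf]
          intro h'; exact hc h'.symm
        simp only [hp, Bool.false_eq_true, if_false]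
        rw [ih t (c :: acc) (by simpa using Nat.le_of_succ_le_succ h)]
        simp [hc]

theorem replace_single (o : Char) (new l : List Char) :
    PySem.Chars.replace l [o] new
      = l.flatMap (fun c => if c = o then new else [c]) := by
  rw [PySem.Chars.replace]
  simp only [List.isEmpty_cons, Bool.false_eq_true, if_false]
  exact replace_go_single o new l.length l [] (le_refl _)

theorem replace_single_map (o n : Char) (l : List Char) :
    PySem.Chars.replace l [o] [n] = l.map (fun c => if c = o then n else c) := by
  rw [replace_single]
  induction l with
  | nil => rfl
  | cons c t ih => by_cases h : c = o <;> simp [h, ih]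

-- the four chained replaces act characterwise as pvTr
theorem seq4_toList (seq : String) :
    (PySem.Str.replace (PySem.Str.replace (PySem.Str.replace
        (PySem.Str.replace seq "B" "N") "Z" "Q") "U" "C") "O" "K").toList
      = seq.toList.map pvTr := by
  simp only [PySem.Str.toList_replace]
  rw [show ("B" : String).toList = ['B'] from rfl, show ("N" : String).toList = ['N'] from rfl,
      show ("Z" : String).toList = ['Z'] from rfl, show ("Q" : String).toList = ['Q'] from rfl,
      show ("U" : String).toList = ['U'] from rfl, show ("C" : String).toList = ['C'] from rfl,
      show ("O" : String).toList = ['O'] from rfl, show ("K" : String).toList = ['K'] from rfl]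
  rw [replace_single_map, replace_single_map, replace_single_map, replace_single_map]
  simp only [List.map_map]
  apply List.map_congr_left
  intro c _
  simp only [Function.comp]
  unfold pvTr
  by_cases hB : c = 'B' <;> by_cases hZ : c = 'Z' <;> by_cases hU : c = 'U' <;>
    by_cases hO : c = 'O' <;> simp_all

-- pvTr never produces 'X' from a non-'X' char, and fixes 'X'
theorem trX_of_tr (c : Char) :
    (if pvTr c = 'X' then ([] : List Char) else [pvTr c]) = pvTrX c := by
  by_cases hX : c = 'X'
  · subst hX; decide
  · by_cases hB : c = 'B'
    · subst hB; decide
    · by_cases hZ : c = 'Z'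
      · subst hZ; decide
      · by_cases hU : c = 'U'
        · subst hU; decide
        · by_cases hO : c = 'O'
          · subst hO; decide
          · simp [pvTr, pvTrX, hB, hZ, hU, hO, hX]

-- per-sequence agreement
theorem body_eq (alphabet : List String) (seq : String) :
    (if alphabet.length < 25 then
        let seq1 := PySem.Str.replace seq "B" "N"
        let seq2 := PySem.Str.replace seq1 "Z" "Q"
        let seq3 := PySem.Str.replace seq2 "U" "C"
        let seq4 := PySem.Str.replace seq3 "O" "K"
        if alphabet.length = 20 then PySem.Str.replace seq4 "X" "" else seq4
      else seq)
    = (if 25 ≤ alphabet.length then seq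
       else if alphabet.length = 20 then String.ofList (seq.toList.flatMap pvTrX)
       else String.ofList (seq.toList.map pvTr)) := by
  by_cases h25 : alphabet.length < 25
  · have h25' : ¬ 25 ≤ alphabet.length := by omega
    simp only [if_pos h25, if_neg h25']
    by_cases h20 : alphabet.length = 20
    · simp only [if_pos h20]
      apply String.toList_injective
      rw [PySem.Str.toList_replace, seq4_toList, String.toList_ofList]
      rw [show ("" : String).toList = ([] : List Char) from rfl, String.toList_ofList]
      rw [replace_single, List.flatMap_map]
      apply List.flatMap_congr
      intro c _
      exact trX_of_tr c
    · simp only [if_neg h20]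
      apply String.toList_injective
      rw [seq4_toList, String.toList_ofList]
  · have h25' : 25 ≤ alphabet.length := by omega
    simp only [if_neg h25, if_pos h25']

-- the foldl-append accumulator is a map
theorem foldl_append_map {α β : Type} (f : α → β) (l : List α) (acc : List β) :
    l.foldl (fun a s => a ++ [f s]) acc = acc ++ l.map f := by
  induction l generalizing acc with
  | nil => simp
  | cons x t ih => simp [List.foldl, ih]

-- ===== VERDICT (by name: the statement is the Claim_ definition above) =====
theorem deal_with_strange_aa_spec : Claim_equal_deal_with_strange_aa := by
  intro sequences alphabet _
  unfold Spec_deal_with_strange_aa deal_with_strange_aa deal_with_strange_aa_alt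
  rw [foldl_append_map]
  simp only [List.nil_append]
  by_cases h25 : 25 ≤ alphabet.length
  · rw [if_pos h25]
    conv_rhs => rw [← List.map_id sequences]
    apply List.map_congr_left
    intro seq _
    rw [body_eq alphabet seq, if_pos h25, id]
  · rw [if_neg h25]
    by_cases h20 : alphabet.length = 20
    · rw [if_pos h20]
      apply List.map_congr_left
      intro seq _
      rw [body_eq alphabet seq, if_neg h25, if_pos h20]
    · rw [if_neg h20]
      apply List.map_congr_left
      intro seq _
      rw [body_eq alphabet seq, if_neg h25, if_neg h20]
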